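-- pv_equiv track=rewrite | github.com/kvshw/phd-ehr-software | app/backend/services/mape_k_analyze.py | _analyze_risk_changes
-- ===== SOURCE A (Python) =====
-- from typing import Dict, Any, List, Optional, Tuple
--
-- def _analyze_risk_changes(changes: List[Dict[str, Any]]) -> Dict[str, Any]:
--     """Analyze risk change patterns"""
--     if not changes:
--         return {
--             "total_changes": 0,
--             "escalations": 0,
--             "deescalations": 0
--         }
--
--     escalations = 0
--     deescalations = 0
--
--     risk_levels = {"routine": 1, "needs_attention": 2, "high_concern": 3}
--
--     for change in changes:
--         prev = change.get("previous_risk_level", "routine")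
--         new = change.get("new_risk_level", "routine")
--
--         prev_level = risk_levels.get(prev, 1)
--         new_level = risk_levels.get(new, 1)
--
--         if new_level > prev_level:
--             escalations += 1
--         elif new_level < prev_level:
--             deescalations += 1
--
--     return {
--         "total_changes": len(changes),
--         "escalations": escalations,
--         "deescalations": deescalations
--     }
-- ===== SOURCE B (Python) =====
-- def _analyze_risk_changes(changes):
--     """Analyze risk change patterns"""
--     risk_levels = {"routine": 1, "needs_attention": 2, "high_concern": 3}
--
--     # Stage 1: tally the distinct (previous, new) raw label pairs.
--     pair_counts = {}
--     for change in changes: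
--         key = (change.get("previous_risk_level", "routine"),
--                change.get("new_risk_level", "routine"))
--         pair_counts[key] = pair_counts.get(key, 0) + 1
--
--     # Stage 2: classify each DISTINCT pair once and add its multiplicity.
--     escalations = 0
--     deescalations = 0
--     for (prev, new), cnt in pair_counts.items():
--         diff = risk_levels.get(new, 1) - risk_levels.get(prev, 1)
--         if diff > 0:
--             escalations += cnt
--         elif diff < 0:
--             deescalations += cnt
--
--     return {"total_changes": len(changes),
--             "escalations": escalations,
--             "deescalations": deescalations}
-- ===== Notes on version B (the rewrite author's own statement) =====
-- stated objective: alternative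
-- what changed: Instead of classifying every change inside one loop with two running counters, B first groups the changes into a frequency dict keyed by the raw (previous, new) label pair, then classifies each DISTINCT pair exactly once and adds its multiplicity to the escalation/deescalation totals.
import Mathlib
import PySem

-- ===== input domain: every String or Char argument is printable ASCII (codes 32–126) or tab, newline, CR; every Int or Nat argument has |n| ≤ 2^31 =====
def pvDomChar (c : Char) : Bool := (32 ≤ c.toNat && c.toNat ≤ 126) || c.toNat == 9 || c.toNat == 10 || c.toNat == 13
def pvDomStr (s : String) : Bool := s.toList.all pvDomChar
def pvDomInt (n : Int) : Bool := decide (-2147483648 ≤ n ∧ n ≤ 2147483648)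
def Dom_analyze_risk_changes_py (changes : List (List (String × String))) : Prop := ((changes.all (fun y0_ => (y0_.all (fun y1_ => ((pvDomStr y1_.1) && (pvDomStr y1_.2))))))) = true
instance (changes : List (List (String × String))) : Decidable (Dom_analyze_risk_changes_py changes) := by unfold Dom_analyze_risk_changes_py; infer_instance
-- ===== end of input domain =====

-- B first tallies the distinct (previous, new) raw label pairs into a frequency dict,
-- then classifies each DISTINCT pair once and adds its multiplicity; alternative, same cost.

def pvRiskLevels : PySem.Dict String Int :=
  PySem.Dict.ofList [("routine", 1), ("needs_attention", 2), ("high_concern", 3)]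

-- ===== PORT A =====
def analyze_risk_changes_py (changes : List (List (String × String))) : List (String × Int) :=
  if changes = [] then
    [("total_changes", 0), ("escalations", 0), ("deescalations", 0)]
  else
    let st := changes.foldl (fun (p : Int × Int) change =>
      let prev := PySem.Dict.getD (PySem.Dict.ofList change) "previous_risk_level" "routine"
      let nw := PySem.Dict.getD (PySem.Dict.ofList change) "new_risk_level" "routine"
      let prev_level := PySem.Dict.getD pvRiskLevels prev 1
      let new_level := PySem.Dict.getD pvRiskLevels nw 1
      if new_level > prev_level then (p.1 + 1, p.2)
      else if new_level < prev_level then (p.1, p.2 + 1)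
      else p) (0, 0)
    [("total_changes", (changes.length : Int)), ("escalations", st.1), ("deescalations", st.2)]

-- ===== PORT B =====
-- the (previous_risk_level, new_risk_level) raw label pair of one change, with Python's defaults
def pvKeyB (change : List (String × String)) : String × String :=
  (PySem.Dict.getD (PySem.Dict.ofList change) "previous_risk_level" "routine",
   PySem.Dict.getD (PySem.Dict.ofList change) "new_risk_level" "routine")

def analyze_risk_changes_py_alt (changes : List (List (String × String))) : List (String × Int) :=
  -- Stage 1: pair_counts[key] = pair_counts.get(key, 0) + 1 over all changes
  let pair_counts : PySem.Dict (String × String) Int :=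
    changes.foldl (fun d change => let key := pvKeyB change
                                   d.insert key (d.getD key 0 + 1)) PySem.Dict.empty
  -- Stage 2: classify each distinct pair once, weighted by its multiplicity
  let st := pair_counts.items.foldl (fun (p : Int × Int) kv =>
      let diff := PySem.Dict.getD pvRiskLevels kv.1.2 1 - PySem.Dict.getD pvRiskLevels kv.1.1 1
      if diff > 0 then (p.1 + kv.2, p.2)
      else if diff < 0 then (p.1, p.2 + kv.2)
      else p) (0, 0)
  [("total_changes", (changes.length : Int)),
   ("escalations", st.1), ("deescalations", st.2)]

-- ===== PRECONDITION & SPEC =====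
def Spec_analyze_risk_changes_py (changes : List (List (String × String))) (out : List (String × Int)) : Prop := out = analyze_risk_changes_py_alt changes
instance (changes : List (List (String × String))) (out : List (String × Int)) : Decidable (Spec_analyze_risk_changes_py changes out) := by unfold Spec_analyze_risk_changes_py; infer_instance

-- ===== CLAIM (what is proved, stated in full; the proofs are below) =====
def Claim_equal_analyze_risk_changes_py : Prop := ∀ (changes : List (List (String × String))), Dom_analyze_risk_changes_py changes → Spec_analyze_risk_changes_py changes (analyze_risk_changes_py changes)

-- ===== LEMMAS AND PROOFS =====

-- a label pair escalates / deescalates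
def pvPos (k : String × String) : Bool :=
  PySem.Dict.getD pvRiskLevels k.2 1 - PySem.Dict.getD pvRiskLevels k.1 1 > 0
def pvNeg (k : String × String) : Bool :=
  PySem.Dict.getD pvRiskLevels k.2 1 - PySem.Dict.getD pvRiskLevels k.1 1 < 0

-- A's loop step, written on the key pair
lemma pvStepA_eq (p : Int × Int) (c : List (String × String)) :
    (let prev := PySem.Dict.getD (PySem.Dict.ofList c) "previous_risk_level" "routine"
     let nw := PySem.Dict.getD (PySem.Dict.ofList c) "new_risk_level" "routine"
     let prev_level := PySem.Dict.getD pvRiskLevels prev 1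
     let new_level := PySem.Dict.getD pvRiskLevels nw 1
     if new_level > prev_level then (p.1 + 1, p.2)
     else if new_level < prev_level then (p.1, p.2 + 1)
     else p)
    = (p.1 + (if pvPos (pvKeyB c) then (1:Int) else 0),
       p.2 + (if pvNeg (pvKeyB c) then (1:Int) else 0)) := by
  unfold pvPos pvNeg pvKeyB
  dsimp only
  split_ifs <;> simp_all [Prod.ext_iff] <;> omega

-- A's fold counts the pairs with positive / negative level difference
lemma pvFoldA (changes : List (List (String × String))) (a b : Int) :
    changes.foldl (fun (p : Int × Int) change =>
      let prev := PySem.Dict.getD (PySem.Dict.ofList change) "previous_risk_level" "routine"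
      let nw := PySem.Dict.getD (PySem.Dict.ofList change) "new_risk_level" "routine"
      let prev_level := PySem.Dict.getD pvRiskLevels prev 1
      let new_level := PySem.Dict.getD pvRiskLevels nw 1
      if new_level > prev_level then (p.1 + 1, p.2)
      else if new_level < prev_level then (p.1, p.2 + 1)
      else p) (a, b)
    = (a + ((changes.map pvKeyB).countP pvPos : Int),
       b + ((changes.map pvKeyB).countP pvNeg : Int)) := by
  induction changes generalizing a b with
  | nil => simp
  | cons c cs ih =>
    rw [List.foldl_cons, pvStepA_eq (a, b) c, ih]
    simp only [List.map_cons, List.countP_cons, Prod.ext_iff]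
    constructor <;> split_ifs <;> simp_all <;> omega

-- B's second-loop step, on an (pair, count) item
lemma pvStepB_eq (p : Int × Int) (kv : (String × String) × Int) :
    (let diff := PySem.Dict.getD pvRiskLevels kv.1.2 1 - PySem.Dict.getD pvRiskLevels kv.1.1 1
     if diff > 0 then (p.1 + kv.2, p.2)
     else if diff < 0 then (p.1, p.2 + kv.2)
     else p)
    = (p.1 + (if pvPos kv.1 then kv.2 else 0),
       p.2 + (if pvNeg kv.1 then kv.2 else 0)) := by
  unfold pvPos pvNeg
  dsimp only
  split_ifs <;> simp_all [Prod.ext_iff] <;> omega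

-- B's second fold, over any items list, splits into two weighted sums
lemma pvFoldB (L : List ((String × String) × Int)) (a b : Int) :
    L.foldl (fun (p : Int × Int) kv =>
      let diff := PySem.Dict.getD pvRiskLevels kv.1.2 1 - PySem.Dict.getD pvRiskLevels kv.1.1 1
      if diff > 0 then (p.1 + kv.2, p.2)
      else if diff < 0 then (p.1, p.2 + kv.2)
      else p) (a, b)
    = (a + (L.map (fun kv => if pvPos kv.1 then kv.2 else 0)).sum,
       b + (L.map (fun kv => if pvNeg kv.1 then kv.2 else 0)).sum) := by
  induction L generalizing a b with
  | nil => simp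
  | cons kv L ih =>
    rw [List.foldl_cons, pvStepB_eq (a, b) kv, ih]
    simp only [List.map_cons, List.sum_cons, Prod.ext_iff]
    constructor <;> ring

-- Σ over a nodup key list of "1 if this key is x and p holds" is "1 if p x" (x in the list)
lemma pvSumIndicator (p : (String × String) → Bool) (x : String × String)
    (ks : List (String × String)) (hnd : ks.Nodup) (hx : x ∈ ks) :
    (ks.map (fun k => if p k then (if x = k then (1 : Int) else 0) else 0)).sum
      = if p x then (1 : Int) else 0 := by
  induction ks with
  | nil => cases hx
  | cons k ks ih =>
    simp only [List.map_cons, List.sum_cons]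
    rcases List.mem_cons.mp hx with h | h
    · subst h
      have hz : (ks.map (fun k => if p k then (if x = k then (1:Int) else 0) else 0)).sum = 0 := by
        apply List.sum_eq_zero
        intro y hy
        obtain ⟨k', hk', rfl⟩ := List.mem_map.mp hy
        have hne : x ≠ k' := fun e => (List.nodup_cons.mp hnd).1 (e ▸ hk')
        simp [hne]
      rw [hz]
      by_cases hp : p x <;> simp [hp]
    · have hxk : x ≠ k := fun e => (List.nodup_cons.mp hnd).1 (e ▸ h)
      rw [ih (List.nodup_cons.mp hnd).2 h]
      by_cases hp : p k <;> simp [hp, hxk]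

-- Σ over any nodup superset of l's elements of (count in l where p) = countP p l
lemma pvSumCounts' (p : (String × String) → Bool) (l ks : List (String × String))
    (hnd : ks.Nodup) (hl : ∀ x ∈ l, x ∈ ks) :
    (ks.map (fun k => if p k then (l.count k : Int) else 0)).sum = (l.countP p : Int) := by
  induction l with
  | nil => simp
  | cons x l ih =>
    have hsplit : ∀ k, (if p k then ((x :: l).count k : Int) else 0)
        = (if p k then (l.count k : Int) else 0) + (if p k then (if x = k then (1:Int) else 0) else 0) := by
      intro k
      by_cases hp : p k
      · simp only [hp, if_true, List.count_cons]
        by_cases hxk : x = k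
        · subst hxk; simp
        · have hne : (x == k) = false := beq_eq_false_iff_ne.mpr hxk
          rw [hne]; simp [hxk]
      · simp [hp]
    calc (ks.map (fun k => if p k then ((x :: l).count k : Int) else 0)).sum
        = (ks.map (fun k => (if p k then (l.count k : Int) else 0)
            + (if p k then (if x = k then (1:Int) else 0) else 0))).sum := by
          congr 1; exact List.map_congr_left (fun k _ => hsplit k)
      _ = (ks.map (fun k => if p k then (l.count k : Int) else 0)).sum
            + (ks.map (fun k => if p k then (if x = k then (1:Int) else 0) else 0)).sum :=
          PySem.List.sum_map_add_int ks _ _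
      _ = (l.countP p : Int) + (if p x then (1:Int) else 0) := by
          rw [ih (fun y hy => hl y (List.mem_cons_of_mem x hy)),
              pvSumIndicator p x ks hnd (hl x (List.mem_cons_self ..))]
      _ = ((x :: l).countP p : Int) := by
          rw [List.countP_cons]
          by_cases hp : p x <;> simp [hp]
  
-- Σ over the distinct elements of l, of its count where p holds, is countP p l
lemma pvSumCounts (p : (String × String) → Bool) (l : List (String × String)) :
    ((PySem.Set.ofList l).map (fun k => if p k then (l.count k : Int) else 0)).sum
      = (l.countP p : Int) :=
  pvSumCounts' p l (PySem.Set.ofList l) (PySem.Set.nodup_ofList l)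
    (fun x hx => (PySem.Set.mem_ofList l x).mpr hx)

theorem analyze_risk_changes_py_eq (changes : List (List (String × String))) :
    analyze_risk_changes_py changes = analyze_risk_changes_py_alt changes := by
  unfold analyze_risk_changes_py analyze_risk_changes_py_alt
  by_cases h : changes = []
  · subst h; rfl
  · rw [if_neg h]
    have hdict : changes.foldl (fun d change => let key := pvKeyB change
        d.insert key (d.getD key 0 + 1)) PySem.Dict.empty
        = PySem.Dict.counter (changes.map pvKeyB) := by
      rw [← PySem.Dict.foldl_insert_getD_add_one_eq_counter, List.foldl_map]
    simp only [hdict, PySem.Dict.items_counter, pvFoldA, pvFoldB, zero_add,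
      List.map_map]
    have hmapP : ∀ (q : (String × String) → Bool),
        ((fun kv : (String × String) × Int => if q kv.1 then kv.2 else 0) ∘
          (fun k => (k, ((changes.map pvKeyB).count k : Int))))
        = (fun k => if q k then ((changes.map pvKeyB).count k : Int) else 0) := by
      intro q; funext k; simp
    rw [hmapP pvPos, hmapP pvNeg, pvSumCounts, pvSumCounts]

-- ===== VERDICT (by name: the statement is the Claim_ definition above) =====
theorem analyze_risk_changes_py_spec : Claim_equal_analyze_risk_changes_py := by
  intro changes _
  exact analyze_risk_changes_py_eq changes
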